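-- pv_equiv track=rewrite | github.com/cliffpham/algos_dataStructures | algos/exact_matching/boyer_moore/good_suffix_no_comments.py | case_one
-- ===== SOURCE A (Python) =====
-- def case_one(pattern, cur, compare, window):
--     count = 0
--     for i in range(cur, -1, -1):
--         start = i - len(window) + 1
--         if pattern[start:i+1] == window:
--             #check if the character before the start of the match differs from compare
--             if pattern[i-len(window)] != compare:
--                 return count + len(window)
--         count += 1
--     return -1
-- ===== SOURCE B (Python) =====
-- def case_one(pattern, cur, compare, window):
--     # Forward single pass over occurrences of window via str.find (C-level search),
--     # keeping the highest qualifying end position, instead of A's backward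
--     # slice-comparison at every position.
--     if cur < 0:
--         return -1
--     w = len(window)
--     n = len(pattern)
--     if w == 0:
--         for i in range(min(cur, n - 1), -1, -1):
--             if pattern[i] != compare:
--                 return cur - i
--         return -1
--     best = -1
--     start = pattern.find(window)
--     while start != -1 and start + w - 1 <= cur:
--         if pattern[start - 1] != compare:
--             best = start + w - 1
--         start = pattern.find(window, start + 1)
--     return cur - best + w if best != -1 else -1
-- ===== Notes on version B (the rewrite author's own statement) =====
-- stated objective: faster
-- what changed: A scans backward from cur doing a fresh slice comparison of length len(window) at every position; B makes one forward pass over the occurrences of window delivered by C-level str.find, keeping the highest occurrence end <= cur whose preceding character differs, and converts it to A's count.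
import Mathlib
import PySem

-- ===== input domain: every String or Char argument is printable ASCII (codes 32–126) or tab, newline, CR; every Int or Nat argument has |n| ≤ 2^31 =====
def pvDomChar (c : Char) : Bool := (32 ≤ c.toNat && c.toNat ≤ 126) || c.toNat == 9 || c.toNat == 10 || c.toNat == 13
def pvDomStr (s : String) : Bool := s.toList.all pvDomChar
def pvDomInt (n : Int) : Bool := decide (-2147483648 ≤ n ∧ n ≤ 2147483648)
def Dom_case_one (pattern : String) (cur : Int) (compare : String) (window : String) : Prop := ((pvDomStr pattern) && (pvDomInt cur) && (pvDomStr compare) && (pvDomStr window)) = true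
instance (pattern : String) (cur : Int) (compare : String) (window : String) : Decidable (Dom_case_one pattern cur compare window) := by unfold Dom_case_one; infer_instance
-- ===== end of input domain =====

-- B replaces A's backward scan with a slice comparison at every position by one forward
-- pass over the occurrences of `window` delivered by str.find, keeping the highest
-- qualifying end position (objective: faster).

-- ===== PORT A =====
-- 'for i in range(cur, -1, -1)' with the running counter; early return via the two ifs
def case_one_loopA (p win c : List Char) : List Int → Int → Int
  | [], _count => -1
  | i :: rest, count =>
      let start := i - (win.length : Int) + 1
      if PySem.List.slice p (some start) (some (i + 1)) = win then
        if [PySem.List.pyGetD p (i - (win.length : Int)) 'a'] ≠ c then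
          count + (win.length : Int)
        else case_one_loopA p win c rest (count + 1)
      else case_one_loopA p win c rest (count + 1)

def case_one (pattern : String) (cur : Int) (compare : String) (window : String) : Int :=
  case_one_loopA pattern.toList window.toList compare.toList
    (PySem.List.pyRange cur (-1) (-1)) 0

-- ===== PORT B =====
-- the w = 0 branch of Source B: 'for i in range(min(cur, n - 1), -1, -1)'
def case_one_loopE (p c : List Char) (cur : Int) : List Int → Int
  | [] => -1
  | i :: rest =>
      if [PySem.List.pyGetD p i 'a'] ≠ c then cur - i
      else case_one_loopE p c cur rest

-- the while loop of Source B over str.find occurrences; the fuel p.length + 1 only makes the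
-- recursion structural, the loop always exits through its own condition first
def case_one_loopF (p win c : List Char) (cur : Int) : Nat → Int → Int → Int
  | 0, _s, best => best
  | fuel + 1, s, best =>
      if s ≠ -1 ∧ s + (win.length : Int) - 1 ≤ cur then
        let best' := if [PySem.List.pyGetD p (s - 1) 'a'] ≠ c then s + (win.length : Int) - 1 else best
        case_one_loopF p win c cur fuel (PySem.Chars.findFrom p win (s + 1)) best'
      else best

def case_one_alt (pattern : String) (cur : Int) (compare : String) (window : String) : Int :=
  if cur < 0 then -1
  else
    let p := pattern.toList
    let win := window.toList
    let c := compare.toList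
    if win = [] then
      case_one_loopE p c cur (PySem.List.pyRange (min cur ((p.length : Int) - 1)) (-1) (-1))
    else
      let best := case_one_loopF p win c cur (p.length + 1) (PySem.Chars.find p win) (-1)
      if best ≠ -1 then cur - best + (win.length : Int) else -1

-- ===== PRECONDITION & SPEC =====
-- Pre_ excludes exactly the inputs where A raises IndexError: an empty window with
-- 0 ≤ cur and cur ≥ len(pattern) (pattern[cur] is then evaluated and is out of range).
def Pre_case_one (pattern : String) (cur : Int) (compare : String) (window : String) : Prop :=
  window.toList = [] → (cur < 0 ∨ cur < (pattern.toList.length : Int))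
instance (pattern : String) (cur : Int) (compare : String) (window : String) : Decidable (Pre_case_one pattern cur compare window) := by unfold Pre_case_one; infer_instance

def pvWitness_case_one : String × Int × String × String := ("abcab", 4, "c", "ab")

def Spec_case_one (pattern : String) (cur : Int) (compare : String) (window : String) (out : Int) : Prop := out = case_one_alt pattern cur compare window
instance (pattern : String) (cur : Int) (compare : String) (window : String) (out : Int) : Decidable (Spec_case_one pattern cur compare window out) := by unfold Spec_case_one; infer_instance

-- ===== CLAIM (what is proved, stated in full; the proofs are below) =====
def Claim_equal_case_one : Prop := ∀ (pattern : String) (cur : Int) (compare : String) (window : String), Dom_case_one pattern cur compare window → Pre_case_one pattern cur compare window → Spec_case_one pattern cur compare window (case_one pattern cur compare window)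


-- ===== LEMMAS AND PROOFS =====

-- a start position j is "good" when window occurs at j, its end is ≤ cur, and the char at
-- Python index j - 1 (wrapping to the last char at j = 0) differs from compare
def GoodStart (p win c : List Char) (cur : Int) (j : Nat) : Prop :=
  win <+: p.drop j ∧ (j : Int) + (win.length : Int) - 1 ≤ cur ∧
    [PySem.List.pyGetD p ((j : Int) - 1) 'a'] ≠ c

-- what both programs compute for win ≠ [], phrased result-relationally
def IsRes (p win c : List Char) (cur : Int) (r : Int) : Prop :=
  (r = -1 ∧ ∀ j : Nat, ¬ GoodStart p win c cur j) ∨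
  (∃ j : Nat, GoodStart p win c cur j ∧ (∀ j' : Nat, j < j' → ¬ GoodStart p win c cur j') ∧
    r = cur - ((j : Int) + (win.length : Int) - 1) + (win.length : Int))

lemma isRes_unique (p win c : List Char) (cur : Int) (r r' : Int)
    (h : IsRes p win c cur r) (h' : IsRes p win c cur r') : r = r' := by
  rcases h with ⟨hr, hno⟩ | ⟨j, hj, hmax, hr⟩
  · rcases h' with ⟨hr', _⟩ | ⟨j', hj', _, _⟩
    · omega
    · exact absurd hj' (hno j')
  · rcases h' with ⟨_, hno'⟩ | ⟨j', hj', hmax', hr'⟩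
    · exact absurd hj (hno' j)
    · have : j = j' := by
        by_contra hne
        rcases Nat.lt_or_ge j j' with hlt | hge
        · exact hmax j' hlt hj'
        · exact hmax' j (by omega) hj
      subst this; omega

-- A's slice test at end position i holds iff window occurs at the nonnegative start i - w + 1
lemma slice_eq_win_iff (p win : List Char) (hw : win ≠ []) (i : Int) (hi : 0 ≤ i) :
    PySem.List.slice p (some (i - (win.length : Int) + 1)) (some (i + 1)) = win ↔
    ∃ j : Nat, (i : Int) = (j : Int) + (win.length : Int) - 1 ∧ win <+: p.drop j := by
  have hw1 : 1 ≤ win.length := List.length_pos_iff.mpr hw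
  by_cases h : 0 ≤ i - (win.length : Int) + 1
  · rw [PySem.List.slice_toNat p h (by omega)]
    have ha : (i + 1).toNat - (i - (win.length : Int) + 1).toNat = win.length := by omega
    rw [ha]
    constructor
    · rintro hs
      refine ⟨(i - (win.length : Int) + 1).toNat, by omega, ?_⟩
      rw [List.prefix_iff_eq_take]
      exact hs.symm
    · rintro ⟨j, hij, hpre⟩
      have hj : (i - (win.length : Int) + 1).toNat = j := by omega
      rw [hj]
      exact (List.prefix_iff_eq_take.mp hpre).symm
  · constructor
    · intro hs
      exfalso
      have hlen := PySem.List.length_slice p (i - (win.length : Int) + 1) (i + 1)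
      rw [hs] at hlen
      simp only [PySem.List.clampIdx] at hlen
      split_ifs at hlen <;> omega
    · rintro ⟨j, hij, _⟩
      exfalso; omega

-- A's countdown loop computes IsRes (invariant: every good end above a was already rejected)
lemma loopA_aux (p win c : List Char) (cur : Int) (hw : win ≠ []) :
    ∀ (m : Nat) (a : Int), a ≤ cur → (a + 1).toNat ≤ m →
    (∀ j : Nat, GoodStart p win c cur j → (j : Int) + (win.length : Int) - 1 ≤ a) →
    IsRes p win c cur (case_one_loopA p win c (PySem.List.pyRange a (-1) (-1)) (cur - a)) := by
  have hw1 : 1 ≤ win.length := List.length_pos_iff.mpr hw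
  intro m
  induction m with
  | zero =>
    intro a _ hm hbound
    rw [PySem.List.pyRange_neg_one_eq_nil (by omega : a ≤ -1)]
    exact Or.inl ⟨rfl, fun j hj => by have := hbound j hj; omega⟩
  | succ m ih =>
    intro a ha hm hbound
    by_cases haneg : a < 0
    · rw [PySem.List.pyRange_neg_one_eq_nil (by omega : a ≤ -1)]
      exact Or.inl ⟨rfl, fun j hj => by have := hbound j hj; omega⟩
    · rw [PySem.List.pyRange_neg_one_cons (by omega : (-1 : Int) < a)]
      show IsRes p win c cur (case_one_loopA p win c (a :: _) (cur - a))
      by_cases hs : PySem.List.slice p (some (a - (win.length : Int) + 1)) (some (a + 1)) = win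
      · rcases (slice_eq_win_iff p win hw a (by omega)).mp hs with ⟨j, hij, hpre⟩
        have hidx : a - (win.length : Int) = (j : Int) - 1 := by omega
        by_cases hc2 : [PySem.List.pyGetD p (a - (win.length : Int)) 'a'] ≠ c
        · have hres : case_one_loopA p win c (a :: PySem.List.pyRange (a - 1) (-1) (-1)) (cur - a)
              = (cur - a) + (win.length : Int) := by
            simp only [case_one_loopA, if_pos hs, if_pos hc2]
          rw [hres]
          refine Or.inr ⟨j, ⟨hpre, by omega, by rw [← hidx]; exact hc2⟩, ?_, by omega⟩
          intro j' hlt hj'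
          have := hbound j' hj'
          omega
        · have hres : case_one_loopA p win c (a :: PySem.List.pyRange (a - 1) (-1) (-1)) (cur - a)
              = case_one_loopA p win c (PySem.List.pyRange (a - 1) (-1) (-1)) (cur - a + 1) := by
            simp only [case_one_loopA, if_pos hs, if_neg hc2]
          rw [hres]
          have : cur - a + 1 = cur - (a - 1) := by omega
          rw [this]
          refine ih (a - 1) (by omega) (by omega) ?_
          intro j' hj'
          have hb := hbound j' hj'
          rcases lt_or_eq_of_le hb with h | h
          · omega
          · exfalso
            have hj'a : j' = j := by omega
            subst hj'a
            have hcc := hj'.2.2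
            rw [← hidx] at hcc
            exact hc2 hcc
      · have hres : case_one_loopA p win c (a :: PySem.List.pyRange (a - 1) (-1) (-1)) (cur - a)
            = case_one_loopA p win c (PySem.List.pyRange (a - 1) (-1) (-1)) (cur - a + 1) := by
          simp only [case_one_loopA, if_neg hs]
        rw [hres]
        have : cur - a + 1 = cur - (a - 1) := by omega
        rw [this]
        refine ih (a - 1) (by omega) (by omega) ?_
        intro j' hj'
        have hb := hbound j' hj'
        rcases lt_or_eq_of_le hb with h | h
        · omega
        · exfalso
          exact hs ((slice_eq_win_iff p win hw a (by omega)).mpr ⟨j', by omega, hj'.1⟩)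

lemma loopA_isRes (p win c : List Char) (cur : Int) (hw : win ≠ []) :
    IsRes p win c cur (case_one_loopA p win c (PySem.List.pyRange cur (-1) (-1)) 0) := by
  have := loopA_aux p win c cur hw (cur + 1).toNat cur le_rfl le_rfl (fun j hj => hj.2.1)
  simpa using this

lemma occ_le (p win : List Char) (hw : win ≠ []) (j : Nat) (h : win <+: p.drop j) :
    j + win.length ≤ p.length := by
  have h1 := h.length_le
  have h2 : (p.drop j).length = p.length - j := List.length_drop ..
  have hw1 : 1 ≤ win.length := List.length_pos_iff.mpr hw
  omega

lemma no_occ_ge (p win : List Char) (k : Nat) (hk : k ≤ p.length)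
    (h : PySem.Chars.findFrom p win (k : Int) = -1) :
    ∀ j : Nat, k ≤ j → ¬ win <+: p.drop j := by
  intro j hkj hocc
  have hinf := (PySem.Chars.findFrom_natCast_eq_neg_one_iff p win k hk).mp h
  apply hinf
  rw [← PySem.Chars.isIn_iff_infix, ← PySem.Chars.exists_prefix_drop_iff_isIn]
  refine ⟨j - k, ?_⟩
  rw [List.drop_drop]
  have : k + (j - k) = j := by omega
  rw [this]
  exact hocc

-- B's find loop: invariant — all occurrences before k had ends ≤ cur, and best is the
-- end of the largest good start below k (or -1 if there is none)
lemma loopF_aux (p win c : List Char) (cur : Int) (hw : win ≠ []) :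
    ∀ (fuel : Nat) (k : Nat) (best : Int), k ≤ p.length → p.length + 1 - k ≤ fuel →
    (∀ j : Nat, j < k → win <+: p.drop j → (j : Int) + (win.length : Int) - 1 ≤ cur) →
    ((best = -1 ∧ ∀ j : Nat, j < k → ¬ GoodStart p win c cur j) ∨
     (∃ j : Nat, j < k ∧ GoodStart p win c cur j ∧ (∀ j' : Nat, j < j' → j' < k → ¬ GoodStart p win c cur j') ∧ best = (j : Int) + (win.length : Int) - 1)) →
    ((case_one_loopF p win c cur fuel (PySem.Chars.findFrom p win (k : Int)) best = -1 ∧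
        ∀ j : Nat, ¬ GoodStart p win c cur j) ∨
     (∃ j : Nat, GoodStart p win c cur j ∧ (∀ j' : Nat, j < j' → ¬ GoodStart p win c cur j') ∧
        case_one_loopF p win c cur fuel (PySem.Chars.findFrom p win (k : Int)) best = (j : Int) + (win.length : Int) - 1)) := by
  have hw1 : 1 ≤ win.length := List.length_pos_iff.mpr hw
  intro fuel
  induction fuel with
  | zero => intro k best hk hf _ _; exfalso; omega
  | succ fuel ih =>
    intro k best hk hf hbound hinv
    by_cases hs1 : PySem.Chars.findFrom p win (k : Int) = -1
    · have hres : case_one_loopF p win c cur (fuel + 1) (PySem.Chars.findFrom p win (k : Int)) best = best := by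
        simp only [case_one_loopF]
        rw [if_neg]
        intro hcond
        exact hcond.1 hs1
      rw [hres]
      have hnoge := no_occ_ge p win k hk hs1
      rcases hinv with ⟨hb, hno⟩ | ⟨j, hjk, hj, hmax, hb⟩
      · exact Or.inl ⟨hb, fun j hj => by
          by_cases hjk : j < k
          · exact hno j hjk hj
          · exact hnoge j (by omega) hj.1⟩
      · refine Or.inr ⟨j, hj, ?_, hb⟩
        intro j' hlt hj'
        by_cases hj'k : j' < k
        · exact hmax j' hlt hj'k hj'
        · exact hnoge j' (by omega) hj'.1
    · obtain ⟨hks, hoccs, hmin⟩ := PySem.Chars.findFrom_natCast_spec p win k hk hs1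
      generalize hgen : PySem.Chars.findFrom p win (k : Int) = s at hs1 hks hoccs hmin ⊢
      have hs0 : 0 ≤ s := le_trans (Int.natCast_nonneg k) hks
      have hscast : s = ((s.toNat : Nat) : Int) := (Int.toNat_of_nonneg hs0).symm
      have hocc_le := occ_le p win hw s.toNat hoccs
      by_cases hs2 : s + (win.length : Int) - 1 ≤ cur
      · -- the loop iterates: s is a fresh occurrence with end within cur
        have hstep : case_one_loopF p win c cur (fuel + 1) s best =
            (if [PySem.List.pyGetD p (s - 1) 'a'] ≠ c then
              case_one_loopF p win c cur fuel (PySem.Chars.findFrom p win (s + 1))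
                (s + (win.length : Int) - 1)
            else
              case_one_loopF p win c cur fuel (PySem.Chars.findFrom p win (s + 1)) best) := by
          simp only [case_one_loopF]
          rw [if_pos ⟨hs1, hs2⟩]
          by_cases hch : [PySem.List.pyGetD p (s - 1) 'a'] ≠ c
          · rw [if_pos hch, if_pos hch]
          · rw [if_neg hch, if_neg hch]
        have hsucc : s + 1 = ((s.toNat + 1 : Nat) : Int) := by omega
        have hbound' : ∀ j : Nat, j < s.toNat + 1 → win <+: p.drop j → (j : Int) + (win.length : Int) - 1 ≤ cur := by
          intro j hj hocc
          by_cases hjk : j < k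
          · exact hbound j hjk hocc
          · by_cases hjs : j < s.toNat
            · exact absurd hocc (hmin j (by omega) hjs)
            · have : j = s.toNat := by omega
              subst this
              omega
        rw [hstep, hsucc]
        have hk' : s.toNat + 1 ≤ p.length := by omega
        have hfuel' : p.length + 1 - (s.toNat + 1) ≤ fuel := by
          clear hstep hinv hbound hbound' ih hmin hoccs hs1 hs2 hsucc
          omega
        by_cases hch : [PySem.List.pyGetD p (s - 1) 'a'] ≠ c
        · rw [if_pos hch]
          refine ih (s.toNat + 1) (s + (win.length : Int) - 1) hk' hfuel' hbound' ?_
          refine Or.inr ⟨s.toNat, by omega, ⟨hoccs, by omega, ?_⟩, ?_, by omega⟩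
          · have : ((s.toNat : Nat) : Int) - 1 = s - 1 := by omega
            rw [this]
            exact hch
          · intro j' h1 h2 _
            omega
        · rw [if_neg hch]
          refine ih (s.toNat + 1) best hk' hfuel' hbound' ?_
          have hnotgood_s : ¬ GoodStart p win c cur s.toNat := by
            intro hg
            apply hch
            have := hg.2.2
            have hc : ((s.toNat : Nat) : Int) - 1 = s - 1 := by omega
            rw [hc] at this
            exact this
          rcases hinv with ⟨hb, hno⟩ | ⟨j, hjk, hj, hmax, hb⟩
          · refine Or.inl ⟨hb, ?_⟩
            intro j hj hg
            by_cases hjk : j < k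
            · exact hno j hjk hg
            · by_cases hjs : j < s.toNat
              · exact (hmin j (by omega) hjs) hg.1
              · have : j = s.toNat := by omega
                subst this
                exact hnotgood_s hg
          · refine Or.inr ⟨j, by omega, hj, ?_, hb⟩
            intro j' hlt hj'k hg
            by_cases hjk : j' < k
            · exact hmax j' hlt hjk hg
            · by_cases hjs : j' < s.toNat
              · exact (hmin j' (by omega) hjs) hg.1
              · have : j' = s.toNat := by omega
                subst this
                exact hnotgood_s hg
      · -- occurrence found but its end is past cur: the loop stops, best is final
        have hres : case_one_loopF p win c cur (fuel + 1) s best = best := by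
          simp only [case_one_loopF]
          rw [if_neg]
          intro hcond
          exact hs2 hcond.2
        rw [hres]
        have hnoge : ∀ j : Nat, k ≤ j → ¬ GoodStart p win c cur j := by
          intro j hkj hg
          by_cases hjs : j < s.toNat
          · exact (hmin j hkj hjs) hg.1
          · have := hg.2.1
            omega
        rcases hinv with ⟨hb, hno⟩ | ⟨j, hjk, hj, hmax, hb⟩
        · exact Or.inl ⟨hb, fun j hg => by
            by_cases hjk : j < k
            · exact hno j hjk hg
            · exact hnoge j (by omega) hg⟩
        · refine Or.inr ⟨j, hj, ?_, hb⟩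
          intro j' hlt hg
          by_cases hjk : j' < k
          · exact hmax j' hlt hjk hg
          · exact hnoge j' (by omega) hg

lemma loopF_isRes (p win c : List Char) (cur : Int) (hw : win ≠ []) :
    IsRes p win c cur
      (if case_one_loopF p win c cur (p.length + 1) (PySem.Chars.find p win) (-1) ≠ -1 then
        cur - case_one_loopF p win c cur (p.length + 1) (PySem.Chars.find p win) (-1) + (win.length : Int)
      else -1) := by
  have hw1 : 1 ≤ win.length := List.length_pos_iff.mpr hw
  have h := loopF_aux p win c cur hw (p.length + 1) 0 (-1) (by omega) (by omega)
    (fun j hj _ => absurd hj (Nat.not_lt_zero j))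
    (Or.inl ⟨rfl, fun j hj _ => absurd hj (Nat.not_lt_zero j)⟩)
  rw [Nat.cast_zero, PySem.Chars.findFrom_zero] at h
  rcases h with ⟨hr, hno⟩ | ⟨j, hj, hmax, hr⟩
  · rw [if_neg (by omega)]
    exact Or.inl ⟨rfl, hno⟩
  · rw [if_pos (by omega), hr]
    exact Or.inr ⟨j, hj, hmax, rfl⟩

lemma slice_self_nil (p : List Char) (a : Int) :
    PySem.List.slice p (some a) (some a) = [] := by
  have := PySem.List.length_slice p a a
  rw [Nat.sub_self] at this
  exact List.eq_nil_of_length_eq_zero this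

-- empty window: both loops walk the same countdown and agree position by position
lemma loopE_eq (p c : List Char) (cur : Int) :
    ∀ (m : Nat) (a : Int), (a + 1).toNat ≤ m →
    case_one_loopA p [] c (PySem.List.pyRange a (-1) (-1)) (cur - a) =
    case_one_loopE p c cur (PySem.List.pyRange a (-1) (-1)) := by
  intro m
  induction m with
  | zero =>
    intro a hm
    rw [PySem.List.pyRange_neg_one_eq_nil (by omega : a ≤ -1)]
    rfl
  | succ m ih =>
    intro a hm
    by_cases haneg : a < 0
    · rw [PySem.List.pyRange_neg_one_eq_nil (by omega : a ≤ -1)]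
      rfl
    · rw [PySem.List.pyRange_neg_one_cons (by omega : (-1 : Int) < a)]
      simp only [case_one_loopA, case_one_loopE, List.length_nil, Nat.cast_zero, sub_zero]
      rw [if_pos (slice_self_nil p (a + 1))]
      by_cases hch : [PySem.List.pyGetD p a 'a'] ≠ c
      · rw [if_pos hch, if_pos hch]
        omega
      · rw [if_neg hch, if_neg hch]
        have : cur - a + 1 = cur - (a - 1) := by omega
        rw [this]
        exact ih (a - 1) (by omega)

-- ===== VERDICT (by name: the statement is the Claim_ definition above) =====
theorem case_one_spec : Claim_equal_case_one := by
  intro pattern cur compare window _hdom hpre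
  unfold Spec_case_one case_one case_one_alt
  by_cases hcur : cur < 0
  · rw [PySem.List.pyRange_neg_one_eq_nil (by omega : cur ≤ -1), if_pos hcur]
    rfl
  · rw [if_neg hcur]
    by_cases hwin : window.toList = []
    · rw [hwin, if_pos rfl]
      rcases hpre hwin with h | h
      · omega
      · have hmin : min cur ((pattern.toList.length : Int) - 1) = cur := by omega
        rw [hmin]
        have := loopE_eq pattern.toList compare.toList cur (cur + 1).toNat cur le_rfl
        simpa using this
    · rw [if_neg hwin]
      exact isRes_unique pattern.toList window.toList compare.toList cur _ _
        (loopA_isRes pattern.toList window.toList compare.toList cur hwin)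
        (loopF_isRes pattern.toList window.toList compare.toList cur hwin)
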